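-- pv_equiv track=rewrite | github.com/Xiaoleiii/Github-Visualization | controller.py | convertListDict
-- ===== SOURCE A (Python) =====
-- import operator
--
-- def convertListDict(l, n):
--     r = {}
--     for d in l:
--         for k, v in d.items():
--             if k in r.keys():
--                 r[k] = r[k] + v
--             else:
--                 r.setdefault(k, v)
--     sorted_d = dict(sorted(r.items(), key=operator.itemgetter(1), reverse=True))
--
--     return {k: sorted_d[k] for k in list(sorted_d)[:n]}
-- ===== SOURCE B (Python) =====
-- import heapq
-- from operator import itemgetter
--
-- def convertListDict(l, n):
--     totals = {}
--     for k, v in (kv for d in l for kv in d.items()):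
--         totals[k] = totals.get(k, 0) + v
--     # bounded-heap top-n selection; heapq.nlargest is documented equivalent to
--     # sorted(iterable, key=key, reverse=True)[:n], including stable tie order
--     return dict(heapq.nlargest(n, totals.items(), key=itemgetter(1)))
-- ===== Notes on version B (the rewrite author's own statement) =====
-- stated objective: alternative
-- what changed: B aggregates in one pass over the flattened (key, value) stream and replaces A's full stable reverse sort + slice + dict-comprehension tail by heapq.nlargest's bounded-heap top-n selection.
-- outside the precondition, e.g. on convertListDict([{'a': 1, 'b': 2}], -1): A returns {'b': 2}, B returns {}
import Mathlib
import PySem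

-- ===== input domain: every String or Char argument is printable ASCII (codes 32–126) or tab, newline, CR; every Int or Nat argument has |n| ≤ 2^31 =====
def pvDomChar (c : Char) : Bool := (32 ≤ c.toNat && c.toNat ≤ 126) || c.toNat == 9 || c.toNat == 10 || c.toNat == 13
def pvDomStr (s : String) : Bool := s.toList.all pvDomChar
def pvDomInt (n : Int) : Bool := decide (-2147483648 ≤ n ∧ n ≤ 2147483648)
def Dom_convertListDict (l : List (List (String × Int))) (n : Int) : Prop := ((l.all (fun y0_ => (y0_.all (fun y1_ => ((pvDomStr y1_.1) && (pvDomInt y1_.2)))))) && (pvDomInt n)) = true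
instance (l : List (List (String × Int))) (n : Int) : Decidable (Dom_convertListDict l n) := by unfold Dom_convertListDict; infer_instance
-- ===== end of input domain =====

-- B aggregates in one pass over the flattened items and replaces A's full stable
-- reverse sort + slice + dict comprehension by heapq.nlargest's bounded-heap top-n
-- selection (objective: alternative selection strategy).

-- ===== PORT A =====
-- each inner 'd' is a Python dict: materialise it with PySem.Dict.ofList, then iterate its items
def convertListDict (l : List (List (String × Int))) (n : Int) : List (String × Int) :=
  let r : PySem.Dict String Int :=
    l.foldl (fun r d =>
      (PySem.Dict.ofList d).items.foldl (fun r p =>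
        if r.contains p.1 then r.insert p.1 (r.getD p.1 0 + p.2)  -- r[k]: key present here, getD default never used
        else r.setdefault p.1 p.2) r) PySem.Dict.empty
  let sorted_d : PySem.Dict String Int :=
    PySem.Dict.ofList (PySem.List.sorted r.items (fun p => p.2) true)
  -- {k: sorted_d[k] for k in list(sorted_d)[:n]}; sorted_d[k]: k comes from sorted_d's own keys, getD default never used
  (PySem.Dict.ofList ((PySem.List.slice sorted_d.keys none (some n)).map
      (fun k => (k, sorted_d.getD k 0)))).items

-- ===== PORT B =====
def convertListDict_alt (l : List (List (String × Int))) (n : Int) : List (String × Int) :=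
  -- single pass over the flattened (k, v) stream
  let totals : PySem.Dict String Int :=
    (l.flatMap (fun d => (PySem.Dict.ofList d).items)).foldl
      (fun t p => t.insert p.1 (t.getD p.1 0 + p.2)) PySem.Dict.empty
  -- heapq.nlargest(n, totals.items(), key=itemgetter(1)), ported by its documented
  -- contract 'sorted(iterable, key=key, reverse=True)[:n]' (n ≤ 0 gives [], as .toNat does)
  (PySem.Dict.ofList ((PySem.List.sorted totals.items (fun p => p.2) true).take n.toNat)).items

-- ===== PRECONDITION & SPEC =====
-- Pre_ excludes negative n, on which A returns but the corner is anybody's: A's all-but-last-|n|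
-- result is an artefact of Python slice semantics for a "top n" request, and B's empty dict
-- (heapq.nlargest on a negative count) is equally defensible.
def Pre_convertListDict (l : List (List (String × Int))) (n : Int) : Prop := 0 ≤ n
instance (l : List (List (String × Int))) (n : Int) : Decidable (Pre_convertListDict l n) := by unfold Pre_convertListDict; infer_instance
def pvWitness_convertListDict : (List (List (String × Int))) × Int := ([[("a", 1), ("b", 2)]], 1)

def Spec_convertListDict (l : List (List (String × Int))) (n : Int) (out : List (String × Int)) : Prop := out = convertListDict_alt l n
instance (l : List (List (String × Int))) (n : Int) (out : List (String × Int)) : Decidable (Spec_convertListDict l n out) := by unfold Spec_convertListDict; infer_instance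

-- ===== CLAIM (what is proved, stated in full; the proofs are below) =====
def Claim_equal_convertListDict : Prop := ∀ (l : List (List (String × Int))) (n : Int), Dom_convertListDict l n → Pre_convertListDict l n → Spec_convertListDict l n (convertListDict l n)

-- ===== LEMMAS AND PROOFS =====

-- the two aggregation steps coincide: on a present key both add, on an absent key
-- setdefault k v = insert k v and getD k 0 + v = v
lemma pvStep_eq :
    (fun (r : PySem.Dict String Int) (p : String × Int) =>
      if r.contains p.1 then r.insert p.1 (r.getD p.1 0 + p.2) else r.setdefault p.1 p.2)
    = (fun (r : PySem.Dict String Int) (p : String × Int) => r.insert p.1 (r.getD p.1 0 + p.2)) := by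
  funext r p
  by_cases h : r.contains p.1 = true
  · simp [h]
  · simp only [Bool.not_eq_true] at h
    simp [h, PySem.Dict.setdefault_of_not_contains r _ h, PySem.Dict.getD_of_not_contains r _ h]

-- a fold over a flattened list is the nested fold
lemma pvFoldl_flatMap {α β γ : Type} (g : β → List α) (f : γ → α → γ) :
    ∀ (l : List β) (init : γ),
      (l.flatMap g).foldl f init = l.foldl (fun acc d => (g d).foldl f acc) init := by
  intro l
  induction l with
  | nil => intro init; simp
  | cons d l ih => intro init; simp [List.foldl_append, ih]

-- ofList of a list with distinct keys keeps the items list unchanged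
lemma pvItems_ofList (ps : List (String × Int)) (h : (ps.map Prod.fst).Nodup) :
    (PySem.Dict.ofList ps).items = ps := by
  have := PySem.Dict.items_foldl_insert_fresh ps Prod.fst Prod.snd PySem.Dict.empty
    (fun a _ => by simp [PySem.Dict.contains_empty]) h
  simpa [PySem.Dict.ofList, PySem.Dict.update] using this

-- the aggregation dict has distinct keys
lemma pvTotals_nodup (l : List (List (String × Int))) (d : PySem.Dict String Int)
    (h : d.keys.Nodup) :
    ((l.foldl (fun t d' =>
      (PySem.Dict.ofList d').items.foldl (fun t p => t.insert p.1 (t.getD p.1 0 + p.2)) t) d).keys).Nodup := by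
  induction l generalizing d with
  | nil => simpa using h
  | cons d0 l ih =>
    simp only [List.foldl_cons]
    exact ih _ (PySem.Dict.nodup_keys_foldl_insert_key (PySem.Dict.ofList d0).items Prod.fst
      (fun t p => t.getD p.1 0 + p.2) d h)

-- ===== VERDICT (by name: the statement is the Claim_ definition above) =====
theorem convertListDict_spec : Claim_equal_convertListDict := by
  intro l n _ hn
  have hn' : (0:Int) ≤ n := hn
  show convertListDict l n = convertListDict_alt l n
  simp only [convertListDict, convertListDict_alt]
  rw [pvStep_eq, pvFoldl_flatMap]
  -- the shared aggregation dict and its sorted items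
  set totals : PySem.Dict String Int :=
    l.foldl (fun t d =>
      (PySem.Dict.ofList d).items.foldl (fun t p => t.insert p.1 (t.getD p.1 0 + p.2)) t)
      PySem.Dict.empty with htotals
  have hnd : totals.keys.Nodup := pvTotals_nodup l PySem.Dict.empty (by simp)
  set ss : List (String × Int) := PySem.List.sorted totals.items (fun p => p.2) true with hss
  have hperm : ss.Perm totals.items := PySem.List.sorted_perm _ _ _
  have hndI : (totals.items.map Prod.fst).Nodup := by
    simpa [PySem.Dict.keys] using hnd
  have hssnd : (ss.map Prod.fst).Nodup := ((hperm.map Prod.fst).nodup_iff).mpr hndI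
  set N : Nat := n.toNat with hN
  have hssTnd : ((ss.take N).map Prod.fst).Nodup := by
    have hsub : List.Sublist ((ss.take N).map Prod.fst) (ss.map Prod.fst) :=
      List.Sublist.map Prod.fst (List.take_sublist N ss)
    exact hssnd.sublist hsub
  have hitems : (PySem.Dict.ofList ss).items = ss := pvItems_ofList ss hssnd
  have hkeysnd : (PySem.Dict.ofList ss).keys.Nodup := by
    show ((PySem.Dict.ofList ss).items.map _).Nodup
    rw [hitems]; exact hssnd
  -- A's tail is take N ss
  have hA : (PySem.Dict.ofList ((PySem.List.slice (PySem.Dict.ofList ss).keys none (some n)).map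
      (fun k => (k, (PySem.Dict.ofList ss).getD k 0)))).items = ss.take N := by
    have hkeys : (PySem.Dict.ofList ss).keys = ss.map Prod.fst := by
      show (PySem.Dict.ofList ss).items.map _ = _
      rw [hitems]
    rw [hkeys]
    rw [PySem.List.slice_to _ hn']
    rw [List.map_take]
    rw [List.map_map]
    have hmap : ss.map ((fun k => (k, (PySem.Dict.ofList ss).getD k 0)) ∘ Prod.fst) = ss := by
      refine (List.map_congr_left (fun p hp => ?_)).trans (List.map_id _)
      have hpit : (p.1, p.2) ∈ (PySem.Dict.ofList ss).items := by rw [hitems]; exact hp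
      have hg := PySem.Dict.getD_of_mem_items _ hpit hkeysnd 0
      simp [Function.comp, hg]
    rw [hmap, pvItems_ofList _ hssTnd]
  rw [hA, pvItems_ofList _ hssTnd]
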